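-- pv_equiv track=rewrite | github.com/kouoibertrand/traffic-jam-simulation | metrics.py | longest_continuous_jam_front
-- ===== SOURCE A (Python) =====
-- def longest_continuous_jam_front(positions, speeds, times):
--     """
--     Identifie la plus longue séquence temporelle continue
--     d'un front arrière de bouchon.
--     """
--
--     fronts = []
--
--     for t in range(len(times)):
--         stopped_positions = [
--             positions[i][t]
--             for i in range(len(speeds))
--             if speeds[i][t] == 0
--         ]
--         if stopped_positions:
--             fronts.append((times[t], min(stopped_positions)))
--         else:
--             fronts.append(None)
--
--     # extraire les segments continus
--     segments = []
--     current = []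
--
--     for p in fronts:
--         if p is not None:
--             current.append(p)
--         elif current:
--             segments.append(current)
--             current = []
--
--     if current:
--         segments.append(current)
--
--     if not segments:
--         return None
--
--     # prendre le plus long
--     return max(segments, key=len)
-- ===== SOURCE B (Python) =====
-- def longest_continuous_jam_front(positions, speeds, times):
--     """Different decomposition: (1) build the per-time front minima by iterating
--     over VEHICLES in the outer loop (transposed loop order, in-place running min
--     into a preallocated array); (2) run-length DP over time with a first-argmax
--     (best_len, best_start); (3) reconstruct the winning segment by slicing."""
--     T = len(times)
--     mins = [None] * T
--     for i in range(len(speeds)):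
--         for t in range(T):
--             if speeds[i][t] == 0:
--                 p = positions[i][t]
--                 if mins[t] is None or p < mins[t]:
--                     mins[t] = p
--     best_len = 0
--     best_start = 0
--     cur = 0
--     for t in range(T):
--         if mins[t] is not None:
--             cur += 1
--             if cur > best_len:
--                 best_len = cur
--                 best_start = t + 1 - cur
--         else:
--             cur = 0
--     if best_len == 0:
--         return None
--     return [(times[t], mins[t]) for t in range(best_start, best_start + best_len)]
-- ===== Notes on version B (the rewrite author's own statement) =====
-- stated objective: alternative
-- what changed: B replaces A's per-time comprehension+min and build-all-segments-then-max by: a transposed vehicle-outer loop filling a preallocated per-time running-min array, a run-length DP with first-argmax tracking only (best_len, best_start, cur) integers, and reconstruction of the winning segment by slicing; no segment lists are ever materialized.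
import Mathlib
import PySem

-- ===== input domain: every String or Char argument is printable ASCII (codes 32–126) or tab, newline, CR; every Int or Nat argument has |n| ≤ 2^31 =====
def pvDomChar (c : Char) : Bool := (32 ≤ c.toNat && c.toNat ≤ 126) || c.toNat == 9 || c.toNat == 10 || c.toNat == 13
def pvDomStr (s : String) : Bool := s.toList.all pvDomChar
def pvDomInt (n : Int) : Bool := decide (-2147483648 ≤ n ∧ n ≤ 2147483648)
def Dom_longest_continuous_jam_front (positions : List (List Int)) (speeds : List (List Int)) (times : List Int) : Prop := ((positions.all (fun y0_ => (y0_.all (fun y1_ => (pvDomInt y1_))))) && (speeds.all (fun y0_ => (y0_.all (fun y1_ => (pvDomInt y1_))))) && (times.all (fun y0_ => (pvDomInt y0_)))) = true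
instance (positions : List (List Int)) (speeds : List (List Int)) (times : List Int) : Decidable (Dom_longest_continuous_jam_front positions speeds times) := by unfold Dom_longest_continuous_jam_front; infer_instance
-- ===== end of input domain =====

-- B replaces A's fronts-list + all-segments + max-by-len by a transposed vehicle-outer
-- running-min array, a run-length DP with first-argmax, and slice reconstruction.

-- ===== PORT A =====
-- stopped_positions comprehension at time t (getD defaults are unreachable under Pre_)
def pvStoppedA (positions speeds : List (List Int)) (t : Nat) : List Int :=
  (List.range speeds.length).filterMap (fun i =>
    if (speeds.getD i []).getD t 1 = 0 then some ((positions.getD i []).getD t 0) else none)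

-- fronts[t]: None, or (times[t], min(stopped_positions)); Python's min is the running-min fold
def pvFrontA (positions speeds : List (List Int)) (times : List Int) (t : Nat) : Option (Int × Int) :=
  match pvStoppedA positions speeds t with
  | [] => none
  | h :: tl => some (times.getD t 0, tl.foldl min h)

-- the segment-extraction loop body over state (segments, current)
def pvStepA (sc : List (List (Int × Int)) × List (Int × Int)) (p : Option (Int × Int)) :
    List (List (Int × Int)) × List (Int × Int) :=
  match p with
  | some x => (sc.1, sc.2 ++ [x])
  | none => if sc.2 = [] then sc else (sc.1 ++ [sc.2], [])

-- Python max(segments, key=len): first longest wins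
def pvPick (b x : List (Int × Int)) : List (Int × Int) := if b.length < x.length then x else b

def pvMaxByLen : List (List (Int × Int)) → Option (List (Int × Int))
  | [] => none
  | h :: tl => some (tl.foldl pvPick h)

def longest_continuous_jam_front (positions : List (List Int)) (speeds : List (List Int)) (times : List Int) : Option (List (Int × Int)) :=
  let fronts := (List.range times.length).map (pvFrontA positions speeds times)
  let sc := fronts.foldl pvStepA ([], [])
  pvMaxByLen (if sc.2 = [] then sc.1 else sc.1 ++ [sc.2])

-- ===== PORT B =====
-- inner body of the transposed min pass: 'if speeds[i][t]==0: p=...; if mins[t] is None or p<mins[t]: mins[t]=p'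
def pvMinsInner (positions speeds : List (List Int)) (i : Nat)
    (mins : List (Option Int)) (t : Nat) : List (Option Int) :=
  if (speeds.getD i []).getD t 1 = 0 then
    let p := (positions.getD i []).getD t 0
    match mins.getD t none with
    | none => mins.set t (some p)
    | some m => if p < m then mins.set t (some p) else mins
  else mins

-- the per-time running-min array, filled vehicle by vehicle
def pvMins (positions speeds : List (List Int)) (T : Nat) : List (Option Int) :=
  (List.range speeds.length).foldl
    (fun mins i => (List.range T).foldl (pvMinsInner positions speeds i) mins)
    (List.replicate T none)

-- run-length DP step over state (best_len, best_start, cur)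
def pvRunStep (mins : List (Option Int)) (s : Nat × Nat × Nat) (t : Nat) : Nat × Nat × Nat :=
  match mins.getD t none with
  | some _ =>
      let cur := s.2.2 + 1
      if s.1 < cur then (cur, t + 1 - cur, cur) else (s.1, s.2.1, cur)
  | none => (s.1, s.2.1, 0)

def longest_continuous_jam_front_alt (positions : List (List Int)) (speeds : List (List Int)) (times : List Int) : Option (List (Int × Int)) :=
  let T := times.length
  let mins := pvMins positions speeds T
  let s := (List.range T).foldl (pvRunStep mins) (0, 0, 0)
  if s.1 = 0 then none
  else some ((List.range' s.2.1 s.1).map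
    (fun t => (times.getD t 0, (mins.getD t none).getD 0)))
  -- the inner '.getD 0' totalizes mins[t], which is a some for every t of the winning run

-- ===== PRECONDITION & SPEC =====
-- Pre_ excludes exactly the inputs where Python A raises IndexError: some speeds[i][t] is out of
-- range, or positions[i][t] is out of range for an i with speeds[i][t] == 0.
def Pre_longest_continuous_jam_front (positions : List (List Int)) (speeds : List (List Int)) (times : List Int) : Prop :=
  ∀ t, t < times.length → ∀ i, i < speeds.length →
    t < (speeds.getD i []).length ∧
    ((speeds.getD i []).getD t 1 = 0 → i < positions.length ∧ t < (positions.getD i []).length)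
instance (positions : List (List Int)) (speeds : List (List Int)) (times : List Int) : Decidable (Pre_longest_continuous_jam_front positions speeds times) := by unfold Pre_longest_continuous_jam_front; infer_instance

def pvWitness_longest_continuous_jam_front : List (List Int) × List (List Int) × List Int :=
  ([[5, 2], [3, 4]], [[0, 0], [0, 1]], [10, 11])

def Spec_longest_continuous_jam_front (positions : List (List Int)) (speeds : List (List Int)) (times : List Int) (out : Option (List (Int × Int))) : Prop := out = longest_continuous_jam_front_alt positions speeds times
instance (positions : List (List Int)) (speeds : List (List Int)) (times : List Int) (out : Option (List (Int × Int))) : Decidable (Spec_longest_continuous_jam_front positions speeds times out) := by unfold Spec_longest_continuous_jam_front; infer_instance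

-- ===== CLAIM (what is proved, stated in full; the proofs are below) =====
def Claim_equal_longest_continuous_jam_front : Prop := ∀ (positions : List (List Int)) (speeds : List (List Int)) (times : List Int), Dom_longest_continuous_jam_front positions speeds times → Pre_longest_continuous_jam_front positions speeds times → Spec_longest_continuous_jam_front positions speeds times (longest_continuous_jam_front positions speeds times)

-- ===== LEMMAS AND PROOFS =====

-- reference single pass: state (best run so far, current run); A is reduced to this first
def pvClose (best : Option (List (Int × Int))) (cur : List (Int × Int)) : Option (List (Int × Int)) :=
  if cur = [] then best
  else match best with
    | none => some cur
    | some b => if b.length < cur.length then some cur else best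

def pvRefStep (bc : Option (List (Int × Int)) × List (Int × Int)) (p : Option (Int × Int)) :
    Option (List (Int × Int)) × List (Int × Int) :=
  match p with
  | some x => (bc.1, bc.2 ++ [x])
  | none => (pvClose bc.1 bc.2, [])

def pvSMin (m : Option Int) (p : Int) : Option Int :=
  match m with
  | none => some p
  | some mv => if p < mv then some p else m

-- pointwise per-time step over vehicles
def pvG (positions speeds : List (List Int)) (t : Nat) (m : Option Int) (i : Nat) : Option Int :=
  if (speeds.getD i []).getD t 1 = 0 then pvSMin m ((positions.getD i []).getD t 0) else m

-- A's per-time min expressed as a value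
def pvFMin (positions speeds : List (List Int)) (t : Nat) : Option Int :=
  match pvStoppedA positions speeds t with
  | [] => none
  | h :: tl => some (tl.foldl min h)

theorem frontA_eq (positions speeds : List (List Int)) (times : List Int) (t : Nat) :
    pvFrontA positions speeds times t
      = (pvFMin positions speeds t).map (fun m => (times.getD t 0, m)) := by
  unfold pvFrontA pvFMin
  cases pvStoppedA positions speeds t <;> rfl

theorem foldl_sMin_some (tl : List Int) : ∀ a : Int,
    tl.foldl pvSMin (some a) = some (tl.foldl min a) := by
  induction tl with
  | nil => intro a; rfl
  | cons h t ih =>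
    intro a
    have hm : pvSMin (some a) h = some (min a h) := by
      simp only [pvSMin, min_def]
      split_ifs <;> simp <;> omega
    simp [List.foldl, hm, ih]

theorem foldl_guard_filterMap (positions speeds : List (List Int)) (t : Nat) :
    ∀ (is : List Nat) (m : Option Int),
    is.foldl (pvG positions speeds t) m
      = (is.filterMap (fun i => if (speeds.getD i []).getD t 1 = 0 then some ((positions.getD i []).getD t 0) else none)).foldl pvSMin m := by
  intro is
  induction is with
  | nil => intro m; rfl
  | cons i is ih =>
    intro m
    simp only [List.foldl_cons, List.filterMap_cons, pvG]
    by_cases h : (speeds.getD i []).getD t 1 = 0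
    · simp only [if_pos h, List.foldl_cons]
      exact ih _
    · simp only [if_neg h]
      exact ih _

theorem pointwise_fold_eq_fmin (positions speeds : List (List Int)) (t : Nat) :
    (List.range speeds.length).foldl (pvG positions speeds t) none
      = pvFMin positions speeds t := by
  rw [foldl_guard_filterMap]
  unfold pvFMin pvStoppedA
  cases hl : (List.range speeds.length).filterMap
      (fun i => if (speeds.getD i []).getD t 1 = 0 then some ((positions.getD i []).getD t 0) else none) with
  | nil => rfl
  | cons h tl =>
    show List.foldl pvSMin (pvSMin none h) tl = _
    rw [show pvSMin none h = some h from rfl, foldl_sMin_some]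

-- one inner-pass step: length preserved and pointwise effect
theorem minsInner_length (positions speeds : List (List Int)) (i : Nat)
    (mins : List (Option Int)) (t : Nat) :
    (pvMinsInner positions speeds i mins t).length = mins.length := by
  unfold pvMinsInner
  split_ifs with h
  · cases hm : mins.getD t none with
    | none => dsimp only; simp
    | some m => dsimp only; split_ifs <;> simp
  · rfl

theorem minsInner_getD (positions speeds : List (List Int)) (i : Nat)
    (mins : List (Option Int)) (t u : Nat) (ht : t < mins.length) :
    (pvMinsInner positions speeds i mins t).getD u none
      = if u = t then pvG positions speeds t (mins.getD t none) i else mins.getD u none := by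
  unfold pvMinsInner pvG pvSMin
  by_cases h : (speeds.getD i []).getD t 1 = 0
  · simp only [if_pos h]
    cases hm : mins.getD t none with
    | none =>
      dsimp only
      simp only [List.getD, List.getElem?_set]
      by_cases hu : u = t
      · subst hu; simp [ht]
      · rw [if_neg (fun he => hu he.symm), if_neg hu]
    | some m =>
      dsimp only
      by_cases hu : u = t
      · subst hu
        rw [if_pos rfl]
        by_cases hp : (positions.getD i []).getD u 0 < m
        · rw [if_pos hp, if_pos hp]
          simp [List.getD, ht]
        · rw [if_neg hp, if_neg hp, hm]
      · rw [if_neg hu]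
        by_cases hp : (positions.getD i []).getD t 0 < m
        · rw [if_pos hp]
          simp only [List.getD, List.getElem?_set]
          rw [if_neg (fun he => hu he.symm)]
        · rw [if_neg hp]
  · simp only [if_neg h]
    by_cases hu : u = t
    · subst hu; simp
    · rw [if_neg hu]

-- inner pass over a nodup index list: pointwise fold
theorem inner_fold_getD (positions speeds : List (List Int)) (i : Nat) :
    ∀ (ts : List Nat) (mins : List (Option Int)), ts.Nodup →
      (∀ v ∈ ts, v < mins.length) →
      (ts.foldl (pvMinsInner positions speeds i) mins).length = mins.length ∧
      ∀ u, (ts.foldl (pvMinsInner positions speeds i) mins).getD u none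
        = if u ∈ ts then pvG positions speeds u (mins.getD u none) i else mins.getD u none := by
  intro ts
  induction ts with
  | nil => intro mins _ _; exact ⟨rfl, fun u => by simp⟩
  | cons t ts ih =>
    intro mins hnd hbd
    have ht : t < mins.length := hbd t (by simp)
    have hnd' : ts.Nodup := (List.nodup_cons.mp hnd).2
    have htn : t ∉ ts := (List.nodup_cons.mp hnd).1
    have hbd' : ∀ v ∈ ts, v < (pvMinsInner positions speeds i mins t).length := by
      intro v hv; rw [minsInner_length]; exact hbd v (by simp [hv])
    obtain ⟨hlen, hpt⟩ := ih (pvMinsInner positions speeds i mins t) hnd' hbd'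
    constructor
    · simp only [List.foldl_cons]; rw [hlen, minsInner_length]
    · intro u
      simp only [List.foldl_cons]
      rw [hpt u, minsInner_getD positions speeds i mins t u ht]
      by_cases hu : u ∈ ts
      · have hut : u ≠ t := fun h => htn (h ▸ hu)
        simp [hu, hut]
      · by_cases hut : u = t
        · subst hut; simp [hu]
        · simp [hu, hut]

-- the whole transposed double loop, pointwise: mins[t] = fold of pvG over vehicles
theorem pvMins_spec (positions speeds : List (List Int)) (T : Nat) :
    ∀ (is : List Nat) (mins : List (Option Int)), mins.length = T →
      (is.foldl (fun m i => (List.range T).foldl (pvMinsInner positions speeds i) m) mins).length = T ∧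
      ∀ t, t < T →
        (is.foldl (fun m i => (List.range T).foldl (pvMinsInner positions speeds i) m) mins).getD t none
          = is.foldl (fun m i => pvG positions speeds t m i) (mins.getD t none) := by
  intro is
  induction is with
  | nil => intro mins hm; exact ⟨hm, fun t _ => rfl⟩
  | cons i is ih =>
    intro mins hm
    have hbd : ∀ v ∈ List.range T, v < mins.length := by
      intro v hv; rw [hm]; exact List.mem_range.mp hv
    obtain ⟨hlen, hpt⟩ := inner_fold_getD positions speeds i (List.range T) mins (List.nodup_range) hbd
    obtain ⟨hlen', hpt'⟩ := ih ((List.range T).foldl (pvMinsInner positions speeds i) mins) (by rw [hlen, hm])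
    refine ⟨hlen', fun t htT => ?_⟩
    simp only [List.foldl_cons]
    rw [hpt' t htT, hpt t]
    simp [List.mem_range.mpr htT]

theorem pvMins_getD (positions speeds : List (List Int)) (T : Nat) (t : Nat) (ht : t < T) :
    (pvMins positions speeds T).getD t none = pvFMin positions speeds t := by
  unfold pvMins
  obtain ⟨_, hpt⟩ := pvMins_spec positions speeds T (List.range speeds.length)
    (List.replicate T none) (by simp)
  rw [hpt t ht]
  have : (List.replicate T (none : Option Int)).getD t none = none := by
    simp [List.getD, ht]
  rw [this, ← pointwise_fold_eq_fmin]

-- ==== A reduced to the reference single pass (segments+max = best/current fold) ====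

theorem maxByLen_append (s : List (List (Int × Int))) (c : List (Int × Int)) (hc : c ≠ []) :
    pvMaxByLen (s ++ [c]) = pvClose (pvMaxByLen s) c := by
  cases s with
  | nil => simp [pvMaxByLen, pvClose, hc]
  | cons h t =>
    simp [pvMaxByLen, pvClose, hc, List.foldl_append, pvPick]
    split <;> simp_all

theorem seg_inv (fs : List (Option (Int × Int))) :
    ∀ (s : List (List (Int × Int))) (c : List (Int × Int)),
    (let sc := fs.foldl pvStepA (s, c)
     pvMaxByLen (if sc.2 = [] then sc.1 else sc.1 ++ [sc.2])) =
    (let bc := fs.foldl pvRefStep (pvMaxByLen s, c)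
     pvClose bc.1 bc.2) := by
  induction fs with
  | nil =>
    intro s c
    by_cases hc : c = []
    · simp [hc, pvClose]
    · simp [hc, pvClose, maxByLen_append s c hc]
  | cons p fs ih =>
    intro s c
    cases p with
    | some x =>
      simpa [pvStepA, pvRefStep] using ih s (c ++ [x])
    | none =>
      by_cases hc : c = []
      · subst hc
        simpa [pvStepA, pvRefStep, pvClose] using ih s []
      · have := ih (s ++ [c]) []
        simpa [pvStepA, pvRefStep, hc, pvClose, maxByLen_append s c hc] using this

-- ==== the reference single pass vs B's run-length DP ====

-- the invariant tying the (best,current) list state to B's (best_len, best_start, cur) integers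
def pvInv (F : Nat → Option (Int × Int)) (k : Nat)
    (bc : Option (List (Int × Int)) × List (Int × Int)) (s : Nat × Nat × Nat) : Prop :=
  s.2.2 = bc.2.length ∧ s.2.2 ≤ k ∧
  (List.range' (k - s.2.2) s.2.2).map F = bc.2.map some ∧
  (match pvClose bc.1 bc.2 with
   | none => s.1 = 0
   | some b => s.1 = b.length ∧ 0 < s.1 ∧
       (List.range' s.2.1 s.1).map F = b.map some ∧ s.2.1 + s.1 ≤ k)

theorem pvInv_def (F : Nat → Option (Int × Int)) (k : Nat)
    (best : Option (List (Int × Int))) (cur : List (Int × Int)) (bl bs c : Nat) :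
    pvInv F k (best, cur) (bl, bs, c) ↔
      (c = cur.length ∧ c ≤ k ∧
       (List.range' (k - c) c).map F = cur.map some ∧
       (match pvClose best cur with
        | none => bl = 0
        | some b => bl = b.length ∧ 0 < bl ∧
            (List.range' bs bl).map F = b.map some ∧ bs + bl ≤ k)) := Iff.rfl

theorem pvInv_step_none (F : Nat → Option (Int × Int)) (mins : List (Option Int)) (k : Nat)
    (best : Option (List (Int × Int))) (cur : List (Int × Int)) (bl bs c : Nat)
    (hinv : pvInv F k (best, cur) (bl, bs, c))
    (hF : F k = none) (hm : mins.getD k none = none) :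
    pvInv F (k + 1) (pvRefStep (best, cur) (F k)) (pvRunStep mins (bl, bs, c) k) := by
  obtain ⟨h1, h2, h3, h4⟩ := hinv
  have hstep : pvRunStep mins (bl, bs, c) k = (bl, bs, 0) := by
    unfold pvRunStep; rw [hm]
  have hrstep : pvRefStep (best, cur) (F k) = (pvClose best cur, []) := by rw [hF]; rfl
  rw [hstep, hrstep, pvInv_def]
  refine ⟨rfl, Nat.zero_le _, rfl, ?_⟩
  have hcc : pvClose (pvClose best cur) [] = pvClose best cur := by unfold pvClose; simp
  rw [hcc]
  cases hcl : pvClose best cur with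
  | none => rw [hcl] at h4; exact h4
  | some b =>
    rw [hcl] at h4
    exact ⟨h4.1, h4.2.1, h4.2.2.1, Nat.le_succ_of_le h4.2.2.2⟩

theorem pvInv_step_some (F : Nat → Option (Int × Int)) (mins : List (Option Int)) (k : Nat)
    (best : Option (List (Int × Int))) (cur : List (Int × Int)) (bl bs c : Nat)
    (x : Int × Int) (mv : Int)
    (hinv : pvInv F k (best, cur) (bl, bs, c))
    (hF : F k = some x) (hm : mins.getD k none = some mv) :
    pvInv F (k + 1) (pvRefStep (best, cur) (F k)) (pvRunStep mins (bl, bs, c) k) := by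
  obtain ⟨h1, h2, h3, h4⟩ := hinv
  simp only at h1 h2 h3 h4
  have hstep : pvRunStep mins (bl, bs, c) k
      = (if bl < c + 1 then (c + 1, k + 1 - (c + 1), c + 1) else (bl, bs, c + 1)) := by
    unfold pvRunStep; rw [hm]
  have hrstep : pvRefStep (best, cur) (F k) = (best, cur ++ [x]) := by rw [hF]; rfl
  rw [hstep, hrstep]
  -- the extended current-run slice
  have hslice : (List.range' (k + 1 - (c + 1)) (c + 1)).map F = (cur ++ [x]).map some := by
    have he : k + 1 - (c + 1) = k - c := by omega
    have hsum : (k - c) + c = k := by omega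
    rw [he, List.range'_1_concat, List.map_append, h3, hsum]
    simp [hF]
  cases hcl : pvClose best cur with
  | none =>
    rw [hcl] at h4
    have hcur : cur = [] := by
      unfold pvClose at hcl
      by_cases hc2 : cur = []
      · exact hc2
      · simp only [if_neg hc2] at hcl
        cases best <;> dsimp only at hcl
        · exact absurd hcl (by simp)
        · split_ifs at hcl
    have hb1 : best = none := by
      unfold pvClose at hcl; simpa [hcur] using hcl
    subst hb1; subst hcur
    have hc0 : c = 0 := h1
    subst hc0
    have hlt : bl < 0 + 1 := by omega
    rw [if_pos hlt, pvInv_def]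
    refine ⟨rfl, by omega, by simpa using hslice, ?_⟩
    rw [show pvClose none ([] ++ [x]) = some [x] from rfl]
    exact ⟨rfl, by omega, by simpa using hslice, by omega⟩
  | some b =>
    rw [hcl] at h4
    obtain ⟨hb1, hb2, hb3, hb4⟩ := h4
    have hne : cur ++ [x] ≠ [] := by simp
    cases hbcase : best with
    | none =>
      have hb : b = cur ∧ cur ≠ [] := by
        rw [hbcase] at hcl
        unfold pvClose at hcl
        by_cases hc2 : cur = [] <;> simp [hc2] at hcl
        exact ⟨hcl.symm, hc2⟩
      have hlt : bl < c + 1 := by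
        rw [hb1, hb.1, h1]; omega
      have hcl2 : pvClose none (cur ++ [x]) = some (cur ++ [x]) := by
        unfold pvClose; simp
      rw [if_pos hlt, pvInv_def]
      refine ⟨by simp [h1], by omega, by simpa [h1] using hslice, ?_⟩
      rw [hcl2]
      refine ⟨by simp [h1], by omega, hslice, by omega⟩
    | some b0 =>
      have hmax : bl = max b0.length cur.length := by
        rw [hbcase] at hcl
        unfold pvClose at hcl
        by_cases hc2 : cur = []
        · simp [hc2] at hcl; subst hcl; simp [hc2]; omega
        · by_cases hl : b0.length < cur.length
          · simp [hc2, hl] at hcl; subst hcl; omega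
          · simp [hc2, hl] at hcl; subst hcl; omega
      have hcl2 : pvClose (some b0) (cur ++ [x])
          = if b0.length < cur.length + 1 then some (cur ++ [x]) else some b0 := by
        unfold pvClose; simp [hne]
      by_cases hcond : b0.length < cur.length + 1
      · have hlt : bl < c + 1 := by omega
        rw [if_pos hlt, pvInv_def]
        refine ⟨by simp [h1], by omega, by simpa [h1] using hslice, ?_⟩
        rw [hcl2, if_pos hcond]
        refine ⟨by simp [h1], by omega, hslice, by omega⟩
      · have hnlt : ¬ bl < c + 1 := by omega
        rw [if_neg hnlt, pvInv_def]
        refine ⟨by simp [h1], by omega, by simpa [h1] using hslice, ?_⟩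
        rw [hcl2, if_neg hcond]
        have hbb0 : b = b0 := by
          rw [hbcase] at hcl
          unfold pvClose at hcl
          by_cases hc2 : cur = []
          · simp [hc2] at hcl; exact hcl.symm
          · have hng : ¬ b0.length < cur.length := by omega
            simp [hc2, hng] at hcl; exact hcl.symm
        subst hbb0
        exact ⟨hb1, hb2, hb3, by omega⟩

theorem run_inv (positions speeds : List (List Int)) (times : List Int) :
    ∀ k, k ≤ times.length →
      pvInv (pvFrontA positions speeds times) k
        (((List.range k).map (pvFrontA positions speeds times)).foldl pvRefStep (none, []))
        ((List.range k).foldl (pvRunStep (pvMins positions speeds times.length)) (0, 0, 0)) := by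
  intro k
  induction k with
  | zero => intro _; exact ⟨rfl, Nat.le_refl 0, rfl, rfl⟩
  | succ k ih =>
    intro hk1
    have hk : k < times.length := hk1
    have ih' := ih (Nat.le_of_lt hk)
    set F := pvFrontA positions speeds times with hF
    have hrange : List.range (k+1) = List.range k ++ [k] := List.range_succ
    rw [hrange]
    simp only [List.map_append, List.foldl_append, List.map_cons, List.map_nil,
      List.foldl_cons, List.foldl_nil]
    rcases hB : ((List.range k).map F).foldl pvRefStep (none, []) with ⟨best, cur⟩
    rcases hS : (List.range k).foldl (pvRunStep (pvMins positions speeds times.length)) (0, 0, 0)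
      with ⟨bl, bs, c⟩
    rw [hB, hS] at ih'
    have hmins : (pvMins positions speeds times.length).getD k none = pvFMin positions speeds k :=
      pvMins_getD positions speeds times.length k hk
    have hFk : F k = (pvFMin positions speeds k).map (fun m => (times.getD k 0, m)) :=
      frontA_eq positions speeds times k
    cases hm : pvFMin positions speeds k with
    | none =>
      exact pvInv_step_none F (pvMins positions speeds times.length) k best cur bl bs c ih'
        (by rw [hFk, hm]; rfl) (by rw [hmins, hm])
    | some mv =>
      exact pvInv_step_some F (pvMins positions speeds times.length) k best cur bl bs c
        (times.getD k 0, mv) mv ih' (by rw [hFk, hm]; rfl) (by rw [hmins, hm])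

-- reconstruct a some-valued slice of F through times/mins
theorem recon_eq (positions speeds : List (List Int)) (times : List Int) :
    ∀ (ts : List Nat) (b : List (Int × Int)),
      (∀ t ∈ ts, t < times.length) →
      ts.map (pvFrontA positions speeds times) = b.map some →
      ts.map (fun t => (times.getD t 0,
          ((pvMins positions speeds times.length).getD t none).getD 0)) = b := by
  intro ts
  induction ts with
  | nil =>
    intro b _ h
    cases b with
    | nil => rfl
    | cons x xs => exact absurd h (by simp)
  | cons t ts ih =>
    intro b hbd h
    cases b with
    | nil => exact absurd h (by simp)
    | cons x xs =>
      simp only [List.map_cons, List.cons.injEq] at h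
      have ht : t < times.length := hbd t (by simp)
      have hmins : (pvMins positions speeds times.length).getD t none = pvFMin positions speeds t :=
        pvMins_getD positions speeds times.length t ht
      have hFt := frontA_eq positions speeds times t
      simp only [List.map_cons, List.cons.injEq]
      constructor
      · rw [hFt] at h
        cases hm : pvFMin positions speeds t with
        | none => rw [hm] at h; exact absurd h.1 (by simp)
        | some mv =>
          rw [hm] at h
          have : (times.getD t 0, mv) = x := by simpa using h.1
          rw [hmins, hm, ← this]
          rfl
      · exact ih xs (fun u hu => hbd u (by simp [hu])) h.2

-- ===== VERDICT (by name: the statement is the Claim_ definition above) =====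
theorem longest_continuous_jam_front_spec : Claim_equal_longest_continuous_jam_front := by
  intro positions speeds times _ _
  unfold Spec_longest_continuous_jam_front
  set bc := ((List.range times.length).map (pvFrontA positions speeds times)).foldl pvRefStep (none, []) with hbc
  set s := (List.range times.length).foldl (pvRunStep (pvMins positions speeds times.length)) (0, 0, 0) with hsdef
  have hinv := run_inv positions speeds times times.length (Nat.le_refl _)
  have hA : longest_continuous_jam_front positions speeds times = pvClose bc.1 bc.2 := by
    unfold longest_continuous_jam_front
    exact seg_inv ((List.range times.length).map (pvFrontA positions speeds times)) [] []
  have halt : longest_continuous_jam_front_alt positions speeds times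
      = if s.1 = 0 then none
        else some ((List.range' s.2.1 s.1).map
          (fun t => (times.getD t 0, ((pvMins positions speeds times.length).getD t none).getD 0))) := rfl
  rw [hA, halt]
  obtain ⟨_, _, _, h4⟩ := hinv
  cases hcl : pvClose bc.1 bc.2 with
  | none =>
    rw [hcl] at h4
    replace h4 : s.1 = 0 := h4
    rw [if_pos h4]
  | some b =>
    rw [hcl] at h4
    obtain ⟨hb1, hb2, hb3, hb4⟩ := h4
    rw [← hsdef] at hb1 hb2 hb3 hb4
    have hs1 : ¬ s.1 = 0 := by omega
    rw [if_neg hs1]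
    have hbd : ∀ t ∈ List.range' s.2.1 s.1, t < times.length := by
      intro t htm
      have := List.mem_range'_1.mp htm
      omega
    have hr := recon_eq positions speeds times (List.range' s.2.1 s.1) b hbd hb3
    rw [hr]
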